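-- pv_equiv track=rewrite | github.com/kagarmoe/purseinator | bagfolio/ingest/grouper.py | group_photos
-- ===== SOURCE A (Python) =====
-- def group_photos(
--     filenames: list[str],
--     is_card: list[bool],
-- ) -> list[list[str]]:
--     groups: list[list[str]] = []
--     current: list[str] = []
--     for filename, card in zip(filenames, is_card):
--         if card:
--             if current:
--                 groups.append(current)
--                 current = []
--         else:
--             current.append(filename)
--     if current:
--         groups.append(current)
--     return groups
-- ===== SOURCE B (Python) =====
-- def group_photos(
--     filenames: list[str],
--     is_card: list[bool],
-- ) -> list[list[str]]:
--     pairs = list(zip(filenames, is_card))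
--     n = len(pairs)
--     groups: list[list[str]] = []
--     i = 0
--     while i < n:
--         if pairs[i][1]:
--             i += 1
--         else:
--             j = i + 1
--             while j < n and not pairs[j][1]:
--                 j += 1
--             groups.append([f for f, _ in pairs[i:j]])
--             i = j
--     return groups
-- ===== Notes on version B (the rewrite author's own statement) =====
-- stated objective: alternative
-- what changed: B extracts each non-card run in one go by two-pointer index scanning and slicing, instead of A's element-wise 'current' accumulator with flush-on-card logic.
import Mathlib
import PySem

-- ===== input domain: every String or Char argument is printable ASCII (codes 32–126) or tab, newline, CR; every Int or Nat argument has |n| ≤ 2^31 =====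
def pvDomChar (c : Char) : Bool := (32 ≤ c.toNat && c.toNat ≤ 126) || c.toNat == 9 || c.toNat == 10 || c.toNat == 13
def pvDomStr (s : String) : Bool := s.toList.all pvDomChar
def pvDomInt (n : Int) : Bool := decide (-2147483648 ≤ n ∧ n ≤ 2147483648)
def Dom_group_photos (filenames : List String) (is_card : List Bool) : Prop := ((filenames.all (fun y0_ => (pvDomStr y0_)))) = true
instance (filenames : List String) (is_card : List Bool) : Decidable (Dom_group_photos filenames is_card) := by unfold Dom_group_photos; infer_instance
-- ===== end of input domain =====

-- B replaces A's element-wise accumulator-with-flush by two-pointer run extraction with slices (alternative structure, same O(n) cost).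


-- ===== PORT A =====
def group_photos (filenames : List String) (is_card : List Bool) : List (List String) :=
  let st := (List.zip filenames is_card).foldl
    (fun (st : List (List String) × List String) fc =>
      if fc.2 then
        if st.2 ≠ [] then (st.1 ++ [st.2], ([] : List String)) else st
      else (st.1, st.2 ++ [fc.1])) ([], [])
  if st.2 ≠ [] then st.1 ++ [st.2] else st.1

-- ===== PORT B =====
-- inner 'while j < n and not pairs[j][1]: j += 1' loop of Source B
def pvRunEnd (pairs : List (String × Bool)) (j : Nat) : Nat :=
  if h : j < pairs.length then
    (if (pairs[j]).2 then j else pvRunEnd pairs (j+1))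
  else j
termination_by pairs.length - j

theorem pvRunEnd_ge (pairs : List (String × Bool)) (j : Nat) : j ≤ pvRunEnd pairs j := by
  fun_induction pvRunEnd <;> omega

-- outer while loop of Source B; the slice pairs[i:j] (here 0 ≤ i ≤ j) is (pairs.drop i).take (j-i), exact
def pvLoopB (pairs : List (String × Bool)) (i : Nat) : List (List String) :=
  if h : i < pairs.length then
    if (pairs[i]).2 then pvLoopB pairs (i+1)
    else
      let j := pvRunEnd pairs (i+1)
      ((pairs.drop i).take (j - i)).map Prod.fst :: pvLoopB pairs j
  else []
termination_by pairs.length - i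
decreasing_by
  · omega
  · have := pvRunEnd_ge pairs (i+1)
    omega

def group_photos_alt (filenames : List String) (is_card : List Bool) : List (List String) :=
  pvLoopB (List.zip filenames is_card) 0

-- ===== PRECONDITION & SPEC =====
def Spec_group_photos (filenames : List String) (is_card : List Bool) (out : List (List String)) : Prop := out = group_photos_alt filenames is_card
instance (filenames : List String) (is_card : List Bool) (out : List (List String)) : Decidable (Spec_group_photos filenames is_card out) := by unfold Spec_group_photos; infer_instance

-- ===== CLAIM =====
def Claim_equal_group_photos : Prop := ∀ (filenames : List String) (is_card : List Bool), Dom_group_photos filenames is_card → Spec_group_photos filenames is_card (group_photos filenames is_card)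

-- ===== LEMMAS AND PROOFS =====

-- reference recursion: pvG cur pairs = groups still to be produced, with pending run cur
def pvG (cur : List String) : List (String × Bool) → List (List String)
  | [] => if cur = [] then [] else [cur]
  | (f, c) :: rest =>
    if c then (if cur = [] then pvG [] rest else cur :: pvG [] rest)
    else pvG (cur ++ [f]) rest

theorem pvA_eq_G (pairs : List (String × Bool)) :
    ∀ (groups : List (List String)) (cur : List String),
      (let st := pairs.foldl
        (fun (st : List (List String) × List String) fc =>
          if fc.2 then
            if st.2 ≠ [] then (st.1 ++ [st.2], ([] : List String)) else st
          else (st.1, st.2 ++ [fc.1])) (groups, cur)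
       if st.2 ≠ [] then st.1 ++ [st.2] else st.1) = groups ++ pvG cur pairs := by
  induction pairs with
  | nil =>
    intro groups cur
    by_cases hc : cur = [] <;> simp [pvG, hc]
  | cons p rest ih =>
    intro groups cur
    obtain ⟨f, c⟩ := p
    cases c with
    | true =>
      by_cases hc : cur = []
      · simpa [pvG, hc] using ih groups cur
      · simpa [pvG, hc, List.append_assoc] using ih (groups ++ [cur]) []
    | false =>
      simpa [pvG] using ih groups (cur ++ [f])

-- a pending non-empty run cur followed by the suffix from i: the next group is cur plus the
-- maximal false-run starting at i
theorem pvG_run (pairs : List (String × Bool)) (i : Nat) :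
    ∀ cur : List String, cur ≠ [] →
      pvG cur (pairs.drop i) =
        (cur ++ ((pairs.drop i).take (pvRunEnd pairs i - i)).map Prod.fst) ::
          pvG [] (pairs.drop (pvRunEnd pairs i)) := by
  fun_induction pvRunEnd pairs i with
  | case1 i h hc =>
    intro cur hcur
    rcases hp : pairs[i] with ⟨f, c⟩
    rw [hp] at hc
    rw [List.drop_eq_getElem_cons h, hp]
    cases c with
    | false => simp at hc
    | true => simp [pvG, hcur]
  | case2 i h hc ih =>
    intro cur hcur
    rcases hp : pairs[i] with ⟨f, c⟩
    rw [hp] at hc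
    have hc' : c = false := by simpa using hc
    subst hc'
    have hge := pvRunEnd_ge pairs (i + 1)
    rw [List.drop_eq_getElem_cons h, hp]
    rw [show pvRunEnd pairs (i+1) - i = (pvRunEnd pairs (i+1) - (i+1)) + 1 from by omega]
    simp only [pvG, Bool.false_eq_true, if_false, List.take_succ_cons, List.map_cons]
    rw [ih (cur ++ [f]) (by simp)]
    simp
  | case3 i h =>
    intro cur hcur
    rw [List.drop_eq_nil_iff.mpr (by omega)]
    simp [pvG, hcur]

theorem pvB_eq_G (pairs : List (String × Bool)) (i : Nat) :
    pvLoopB pairs i = pvG [] (pairs.drop i) := by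
  fun_induction pvLoopB pairs i with
  | case1 i h hc ih =>
    rcases hp : pairs[i] with ⟨f, c⟩
    rw [hp] at hc
    have hc' : c = true := by simpa using hc
    subst hc'
    rw [ih, List.drop_eq_getElem_cons h, hp]
    simp [pvG]
  | case2 i h hc jv ih =>
    rcases hp : pairs[i] with ⟨f, c⟩
    rw [hp] at hc
    have hc' : c = false := by simpa using hc
    subst hc'
    have hge := pvRunEnd_ge pairs (i + 1)
    rw [ih]
    conv_rhs => rw [List.drop_eq_getElem_cons h, hp]
    simp only [pvG, Bool.false_eq_true, if_false, List.nil_append]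
    rw [pvG_run pairs (i+1) [f] (by simp)]
    rw [List.drop_eq_getElem_cons h, hp]
    rw [show pvRunEnd pairs (i+1) - i = (pvRunEnd pairs (i+1) - (i+1)) + 1 from by omega]
    simp
    rfl
  | case3 i h =>
    rw [List.drop_eq_nil_iff.mpr (by omega)]
    simp [pvG]

-- ===== VERDICT =====
theorem group_photos_spec : Claim_equal_group_photos := by
  intro filenames is_card _
  unfold Spec_group_photos group_photos group_photos_alt
  rw [pvB_eq_G, List.drop_zero]
  exact pvA_eq_G _ [] []
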